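-- pv_equiv track=rewrite | github.com/vaugouin/extract-movie-questions | extract-movie-questions.py | _sanitize_model_csv_text
-- ===== SOURCE A (Python) =====
-- def _sanitize_model_csv_text(csv_text: str) -> str:
--     if not csv_text:
--         return ""
--
--     lines = str(csv_text).splitlines()
--     cleaned = []
--     in_fenced_block = False
--     for line in lines:
--         stripped = line.strip()
--         if stripped.startswith("```"):
--             in_fenced_block = not in_fenced_block
--             continue
--         if not in_fenced_block and stripped.lower().startswith("please provide"):
--             continue
--         if stripped:
--             cleaned.append(line)
--     return "\n".join(cleaned).strip()
-- ===== SOURCE B (Python) =====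
-- def _split_groups(lines):
--     # segments between fence lines; fence lines themselves are dropped
--     groups = []
--     current = []
--     for line in lines:
--         if line.strip().startswith("```"):
--             groups.append(current)
--             current = []
--         else:
--             current.append(line)
--     groups.append(current)
--     return groups
--
--
-- def _sanitize_model_csv_text(csv_text: str) -> str:
--     if not csv_text:
--         return ""
--     groups = _split_groups(str(csv_text).splitlines())
--     kept = []
--     for i, g in enumerate(groups):
--         if i % 2 == 0:
--             # outside any fenced block: drop blanks and "please provide" filler
--             kept.extend(l for l in g
--                         if l.strip()
--                         and not l.strip().lower().startswith("please provide"))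
--         else:
--             # inside a fenced block: drop blanks only
--             kept.extend(l for l in g if l.strip())
--     return "\n".join(kept).strip()
-- ===== Notes on version B (the rewrite author's own statement) =====
-- stated objective: alternative
-- what changed: B replaces A's single pass with a toggled in-fence flag by a two-phase decomposition: first split the lines into segments delimited by fence lines, then filter each segment by its index parity (even = outside a fence, also dropping 'please provide' filler; odd = inside, dropping blanks only) and join.
import Mathlib
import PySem

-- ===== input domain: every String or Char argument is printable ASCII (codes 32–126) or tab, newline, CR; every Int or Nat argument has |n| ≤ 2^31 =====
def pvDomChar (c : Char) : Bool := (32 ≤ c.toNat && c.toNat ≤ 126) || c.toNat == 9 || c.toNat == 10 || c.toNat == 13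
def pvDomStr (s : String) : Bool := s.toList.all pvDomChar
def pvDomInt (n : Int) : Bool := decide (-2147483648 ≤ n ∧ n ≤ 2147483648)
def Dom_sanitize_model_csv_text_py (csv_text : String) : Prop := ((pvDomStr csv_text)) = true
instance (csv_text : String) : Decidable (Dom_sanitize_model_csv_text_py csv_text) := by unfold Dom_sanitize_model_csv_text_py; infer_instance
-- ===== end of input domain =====

-- B re-implements A's single flag-toggling pass as a two-phase split-into-fence-segments
-- then parity-based filtering decomposition (alternative structure, same cost).


-- ===== PORT A =====
-- A-side helper: the body of A's for-loop (one line, state = (cleaned, in_fenced_block))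
def pvStepA (st : List String × Bool) (line : String) : List String × Bool :=
  let stripped := PySem.Str.strip line
  if PySem.Str.startswith stripped "```" then (st.1, !st.2)
  else if !st.2 && PySem.Str.startswith (PySem.Str.lower stripped) "please provide" then st
  else if stripped ≠ "" then (st.1 ++ [line], st.2)
  else st

def sanitize_model_csv_text_py (csv_text : String) : String :=
  if csv_text = "" then ""
  else
    let lines := PySem.Str.splitlines csv_text
    let st := lines.foldl pvStepA ([], false)
    PySem.Str.strip (PySem.Str.join "\n" st.1)

-- ===== PORT B =====
-- B-side helper: split lines into segments delimited by fence lines (port of _split_groups)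
def pvStepSplit (st : List (List String) × List String) (line : String) :
    List (List String) × List String :=
  if PySem.Str.startswith (PySem.Str.strip line) "```" then (st.1 ++ [st.2], [])
  else (st.1, st.2 ++ [line])

def pvSplitGroups (lines : List String) : List (List String) :=
  let st := lines.foldl pvStepSplit ([], [])
  st.1 ++ [st.2]

-- B-side helper: the filtering loop over enumerate(groups)
def pvKeepGroups : List (List String) → Nat → List String
  | [], _ => []
  | g :: gs, i =>
    (if i % 2 = 0 then
        g.filter (fun l => !(PySem.Str.strip l == "") &&
          !PySem.Str.startswith (PySem.Str.lower (PySem.Str.strip l)) "please provide")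
      else
        g.filter (fun l => !(PySem.Str.strip l == ""))) ++ pvKeepGroups gs (i + 1)

def sanitize_model_csv_text_py_alt (csv_text : String) : String :=
  if csv_text = "" then ""
  else
    PySem.Str.strip (PySem.Str.join "\n"
      (pvKeepGroups (pvSplitGroups (PySem.Str.splitlines csv_text)) 0))

-- ===== PRECONDITION & SPEC =====
def Spec_sanitize_model_csv_text_py (csv_text : String) (out : String) : Prop := out = sanitize_model_csv_text_py_alt csv_text
instance (csv_text : String) (out : String) : Decidable (Spec_sanitize_model_csv_text_py csv_text out) := by unfold Spec_sanitize_model_csv_text_py; infer_instance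

-- ===== CLAIM (what is proved, stated in full; the proofs are below) =====
def Claim_equal_sanitize_model_csv_text_py : Prop := ∀ (csv_text : String), Dom_sanitize_model_csv_text_py csv_text → Spec_sanitize_model_csv_text_py csv_text (sanitize_model_csv_text_py csv_text)

-- ===== LEMMAS AND PROOFS =====

-- recursive characterisation of A's loop (same branches, output only)
def pvProcA : List String → Bool → List String
  | [], _ => []
  | l :: ls, inf =>
    if PySem.Str.startswith (PySem.Str.strip l) "```" then pvProcA ls (!inf)
    else if !inf && PySem.Str.startswith (PySem.Str.lower (PySem.Str.strip l)) "please provide" then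
      pvProcA ls inf
    else if PySem.Str.strip l ≠ "" then l :: pvProcA ls inf
    else pvProcA ls inf

theorem pvProcA_spec : ∀ (ls : List String) (acc : List String) (inf : Bool),
    (ls.foldl pvStepA (acc, inf)).1 = acc ++ pvProcA ls inf := by
  intro ls
  induction ls with
  | nil => intro acc inf; simp [pvProcA]
  | cons l ls ih =>
    intro acc inf
    rw [List.foldl_cons]
    unfold pvProcA
    by_cases hf : PySem.Str.startswith (PySem.Str.strip l) "```" = true
    · rw [show pvStepA (acc, inf) l = (acc, !inf) from by
          simp only [pvStepA]; rw [if_pos hf], if_pos hf, ih]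
    · rw [if_neg hf]
      by_cases hp : (!inf && PySem.Str.startswith (PySem.Str.lower (PySem.Str.strip l)) "please provide") = true
      · rw [show pvStepA (acc, inf) l = (acc, inf) from by
            simp only [pvStepA]; rw [if_neg hf, if_pos hp], if_pos hp, ih]
      · rw [if_neg hp]
        by_cases hs : PySem.Str.strip l ≠ ""
        · rw [show pvStepA (acc, inf) l = (acc ++ [l], inf) from by
              simp only [pvStepA]; rw [if_neg hf, if_neg hp, if_pos hs], if_pos hs, ih]
          simp
        · rw [show pvStepA (acc, inf) l = (acc, inf) from by
              simp only [pvStepA]; rw [if_neg hf, if_neg hp, if_neg hs], if_neg hs, ih]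

-- recursive characterisation of B's splitting loop
def pvSplitRec : List String → List String → List (List String) × List String
  | cur, [] => ([], cur)
  | cur, l :: ls =>
    if PySem.Str.startswith (PySem.Str.strip l) "```" then
      let r := pvSplitRec [] ls
      (cur :: r.1, r.2)
    else pvSplitRec (cur ++ [l]) ls

theorem pvSplitRec_spec : ∀ (ls : List String) (gs : List (List String)) (cur : List String),
    ls.foldl pvStepSplit (gs, cur)
      = (gs ++ (pvSplitRec cur ls).1, (pvSplitRec cur ls).2) := by
  intro ls
  induction ls with
  | nil => intro gs cur; simp [pvSplitRec]
  | cons l ls ih =>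
    intro gs cur
    rw [List.foldl_cons]
    unfold pvSplitRec
    by_cases hf : PySem.Str.startswith (PySem.Str.strip l) "```" = true
    · rw [show pvStepSplit (gs, cur) l = (gs ++ [cur], []) from by
          simp only [pvStepSplit]; rw [if_pos hf], if_pos hf, ih]
      simp
    · rw [show pvStepSplit (gs, cur) l = (gs, cur ++ [l]) from by
          simp only [pvStepSplit]; rw [if_neg hf], if_neg hf, ih]

-- parity-Bool form of the keep loop (inside = true on odd indices)
def pvKeepB : List (List String) → Bool → List String
  | [], _ => []
  | g :: gs, inside =>
    (if inside then g.filter (fun l => !(PySem.Str.strip l == ""))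
     else
        g.filter (fun l => !(PySem.Str.strip l == "") &&
          !PySem.Str.startswith (PySem.Str.lower (PySem.Str.strip l)) "please provide"))
      ++ pvKeepB gs (!inside)

theorem pvKeepGroups_eq_pvKeepB : ∀ (gs : List (List String)) (i : Nat),
    pvKeepGroups gs i = pvKeepB gs (decide (i % 2 = 1)) := by
  intro gs
  induction gs with
  | nil => intro i; simp [pvKeepGroups, pvKeepB]
  | cons g gs ih =>
    intro i
    unfold pvKeepGroups pvKeepB
    rw [ih (i + 1)]
    by_cases h : i % 2 = 0
    · have h1 : ¬ i % 2 = 1 := by omega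
      have h2 : (i + 1) % 2 = 1 := by omega
      rw [if_pos h]
      simp only [h1, h2, decide_true,
        decide_false, Bool.not_false, Bool.false_eq_true, if_false]
    · have h1 : i % 2 = 1 := by omega
      have h2 : ¬ (i + 1) % 2 = 1 := by omega
      rw [if_neg h]
      simp [h1, h2]

-- the heart: filtering the fence segments by parity = A's one-pass filter
theorem pvKeepB_splitRec : ∀ (ls cur : List String) (b : Bool),
    pvKeepB ((pvSplitRec cur ls).1 ++ [(pvSplitRec cur ls).2]) b
      = (if b then cur.filter (fun l => !(PySem.Str.strip l == ""))
         else
           cur.filter (fun l => !(PySem.Str.strip l == "") &&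
             !PySem.Str.startswith (PySem.Str.lower (PySem.Str.strip l)) "please provide"))
        ++ pvProcA ls b := by
  intro ls
  induction ls with
  | nil => intro cur b; simp [pvSplitRec, pvKeepB, pvProcA]
  | cons l ls ih =>
    intro cur b
    unfold pvSplitRec pvProcA
    by_cases hf : PySem.Str.startswith (PySem.Str.strip l) "```" = true
    · rw [if_pos hf, if_pos hf]
      show pvKeepB (cur :: ((pvSplitRec [] ls).1 ++ [(pvSplitRec [] ls).2])) b = _
      unfold pvKeepB
      rw [ih [] (!b)]
      cases b <;> simp
    · rw [if_neg hf, if_neg hf, ih (cur ++ [l]) b]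
      by_cases hs : PySem.Str.strip l = ""
      · have hb : (PySem.Str.strip l == "") = true := by simp [hs]
        by_cases hp : (!b && PySem.Str.startswith (PySem.Str.lower (PySem.Str.strip l)) "please provide") = true
        · rw [if_pos hp]; cases b <;> simp [List.filter_append, hb]
        · rw [if_neg hp, if_neg (by simp [hs] : ¬ PySem.Str.strip l ≠ "")]
          cases b <;> simp [List.filter_append, hb]
      · have hb : (PySem.Str.strip l == "") = false := by simp [hs]
        by_cases hp : (!b && PySem.Str.startswith (PySem.Str.lower (PySem.Str.strip l)) "please provide") = true
        · rw [if_pos hp]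
          rcases Bool.and_eq_true_iff.mp hp with ⟨hb', hpp⟩
          have hbf : b = false := by cases b <;> simp_all
          subst hbf
          simp_all [List.filter_append]
        · rw [if_neg hp, if_pos (by simp [hs] : PySem.Str.strip l ≠ "")]
          cases b with
          | true => simp [List.filter_append, hb]
          | false =>
            have hpp : PySem.Str.startswith (PySem.Str.lower (PySem.Str.strip l)) "please provide" = false := by
              cases hE : PySem.Str.startswith (PySem.Str.lower (PySem.Str.strip l)) "please provide" <;> simp_all
            simp_all [List.filter_append]

-- ===== VERDICT (by name: the statement is the Claim_ definition above) =====
theorem sanitize_model_csv_text_py_spec : Claim_equal_sanitize_model_csv_text_py := by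
  intro csv_text _
  unfold Spec_sanitize_model_csv_text_py sanitize_model_csv_text_py sanitize_model_csv_text_py_alt
  by_cases h : csv_text = ""
  · simp [h]
  · simp only [h, if_false]
    rw [pvKeepGroups_eq_pvKeepB]
    unfold pvSplitGroups
    rw [pvSplitRec_spec _ [] []]
    simp only [List.nil_append]
    rw [show (decide ((0 : Nat) % 2 = 1)) = false from rfl]
    rw [pvKeepB_splitRec (PySem.Str.splitlines csv_text) [] false]
    rw [pvProcA_spec (PySem.Str.splitlines csv_text) [] false]
    simp
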